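-- pv_equiv track=rewrite | github.com/dosqas/uni_projects | 1stYr_Sem1/FP - c/a3-dosqas/programA3.py | generatingbad
-- ===== SOURCE A (Python) =====
-- def generatingbad(x1):
--     ar1 = []
--     even = 50000
--     odd = 0
--
--     for i in range(x1):
--         if i % 2 == 0:
--             ar1.append(odd)
--             odd += 1
--         else:
--             ar1.append(even)
--             even -= 1
--
--     return ar1
-- ===== SOURCE B (Python) =====
-- def generatingbad(x1):
--     return [i // 2 if i % 2 == 0 else 50000 - i // 2 for i in range(x1)]
-- ===== Notes on version B (the rewrite author's own statement) =====
-- stated objective: simpler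
-- what changed: Replaces the stateful loop carrying two running counters (even/odd) with a list comprehension computing each element in closed form from its index (i//2 for even i, 50000 - i//2 for odd i).
import Mathlib
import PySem

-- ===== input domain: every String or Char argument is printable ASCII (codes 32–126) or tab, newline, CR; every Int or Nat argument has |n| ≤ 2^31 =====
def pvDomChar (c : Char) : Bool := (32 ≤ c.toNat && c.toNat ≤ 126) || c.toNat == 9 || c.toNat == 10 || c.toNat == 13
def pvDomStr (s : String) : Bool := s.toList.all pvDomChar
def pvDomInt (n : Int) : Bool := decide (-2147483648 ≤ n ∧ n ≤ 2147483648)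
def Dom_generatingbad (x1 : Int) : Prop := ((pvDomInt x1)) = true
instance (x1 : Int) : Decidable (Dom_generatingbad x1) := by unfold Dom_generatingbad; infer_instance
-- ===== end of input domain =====

-- B replaces A's loop with two running counters by a per-index closed-form comprehension (simpler).


-- ===== PORT A =====
-- loop state: (ar1, even, odd)
def generatingbad (x1 : Int) : List Int :=
  ((PySem.List.pyRange 0 x1 1).foldl
    (fun (s : List Int × Int × Int) i =>
      if PySem.Int.mod i 2 = 0 then (s.1 ++ [s.2.2], s.2.1, s.2.2 + 1)
      else (s.1 ++ [s.2.1], s.2.1 - 1, s.2.2))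
    ([], 50000, 0)).1

-- ===== PORT B =====
def generatingbad_alt (x1 : Int) : List Int :=
  (PySem.List.pyRange 0 x1 1).map
    (fun i => if PySem.Int.mod i 2 = 0 then PySem.Int.floordiv i 2
              else 50000 - PySem.Int.floordiv i 2)

-- ===== PRECONDITION & SPEC =====
def Spec_generatingbad (x1 : Int) (out : List Int) : Prop := out = generatingbad_alt x1
instance (x1 : Int) (out : List Int) : Decidable (Spec_generatingbad x1 out) := by unfold Spec_generatingbad; infer_instance

-- ===== CLAIM (what is proved, stated in full; the proofs are below) =====
def Claim_equal_generatingbad : Prop := ∀ (x1 : Int), Dom_generatingbad x1 → Spec_generatingbad x1 (generatingbad x1)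

-- ===== LEMMAS AND PROOFS =====

-- Invariant: after processing range(0,n), A's state is (B's list, 50000 - n/2, (n+1)/2).
theorem generatingbad_inv (n : Nat) :
    ((PySem.List.pyRange 0 (n : Int) 1).foldl
      (fun (s : List Int × Int × Int) i =>
        if PySem.Int.mod i 2 = 0 then (s.1 ++ [s.2.2], s.2.1, s.2.2 + 1)
        else (s.1 ++ [s.2.1], s.2.1 - 1, s.2.2))
      ([], 50000, 0)) =
    (generatingbad_alt (n : Int), 50000 - (n : Int) / 2, ((n : Int) + 1) / 2) := by
  induction n with
  | zero => simp [generatingbad_alt]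
  | succ m ih =>
    have h : ((m : Int) + 1) = ((m + 1 : Nat) : Int) := by push_cast; ring
    have hr : PySem.List.pyRange 0 ((m + 1 : Nat) : Int) 1
        = PySem.List.pyRange 0 (m : Int) 1 ++ [(m : Int)] := by
      rw [← h, PySem.List.pyRange_one_succ_right (by positivity)]
    rw [hr, List.foldl_append, ih]
    simp only [List.foldl_cons, List.foldl_nil, generatingbad_alt, hr, List.map_append,
      List.map_cons, List.map_nil]
    have hm : PySem.Int.mod (m : Int) 2 = (m : Int) % 2 := by
      simp [PySem.Int.mod, Int.fmod_eq_emod]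
    have hd : PySem.Int.floordiv (m : Int) 2 = (m : Int) / 2 := by
      simp [PySem.Int.floordiv, Int.fdiv_eq_ediv]
    by_cases he : (m : Int) % 2 = 0
    · simp only [hm, hd, he]
      refine Prod.ext ?_ (Prod.ext ?_ ?_) <;> simp <;> omega
    · simp only [hm, hd, if_neg he]
      refine Prod.ext ?_ (Prod.ext ?_ ?_) <;> simp <;> omega

-- ===== VERDICT (by name: the statement is the Claim_ definition above) =====
theorem generatingbad_spec : Claim_equal_generatingbad := by
  intro x1 _
  unfold Spec_generatingbad generatingbad
  by_cases h : x1 ≤ 0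
  · rw [PySem.List.pyRange_one_eq_nil h]
    simp [generatingbad_alt, PySem.List.pyRange_one_eq_nil h]
  · have hx : x1 = ((x1.toNat : Nat) : Int) := by omega
    rw [hx, generatingbad_inv]
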